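-- pv_equiv track=rewrite | github.com/emjayess/sparkle-sublime | Backup/20170905000037/MarkdownEditing/references.py | suggest_default_link_name
-- ===== SOURCE A (Python) =====
-- def suggest_default_link_name(name, image):
--     # Camel case impl.
--     ret = ''
--     name_segs = name.split()
--     if len(name_segs) > 1:
--         for word in name_segs:
--             ret += word.capitalize()
--             if len(ret) > 30:
--                 break
--         return ('image' if image else 'link') + ret
--     else:
--         return name
-- ===== SOURCE B (Python) =====
-- def suggest_default_link_name(name, image):
--     # Camel-case link name via a precomputed prefix-length table instead of an
--     # accumulate-and-break loop.
--     words = name.split()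
--     if len(words) <= 1:
--         return name
--     caps = [w.capitalize() for w in words]
--     cum = []
--     total = 0
--     for c in caps:
--         total += len(c)
--         cum.append(total)
--     keep = next((i + 1 for i, t in enumerate(cum) if t > 30), len(caps))
--     return ('image' if image else 'link') + ''.join(caps[:keep])
-- ===== Notes on version B (the rewrite author's own statement) =====
-- stated objective: alternative
-- what changed: Replaces A's accumulate-and-break string loop with a precomputed capitalized-word list plus a prefix-length table: the cut index is found in the table and the result is a slice-and-join, no early-exit string accumulation.
import Mathlib
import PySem

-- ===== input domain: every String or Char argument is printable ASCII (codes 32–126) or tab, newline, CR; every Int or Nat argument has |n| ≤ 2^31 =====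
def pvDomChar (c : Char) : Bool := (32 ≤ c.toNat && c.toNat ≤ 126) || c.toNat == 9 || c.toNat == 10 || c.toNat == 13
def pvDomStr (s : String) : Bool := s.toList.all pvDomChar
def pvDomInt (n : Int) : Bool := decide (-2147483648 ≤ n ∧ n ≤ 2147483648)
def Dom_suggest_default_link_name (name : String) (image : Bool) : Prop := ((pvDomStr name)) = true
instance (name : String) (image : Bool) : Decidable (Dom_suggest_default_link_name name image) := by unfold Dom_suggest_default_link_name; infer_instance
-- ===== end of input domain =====

-- B replaces A's accumulate-and-break loop with a prefix-length table + slice/join (objective: alternative).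

-- shared helper: Python's str.capitalize(), exact on the ASCII domain
def pyCapitalize (w : String) : String :=
  match w.toList with
  | [] => ""
  | c :: rest => String.ofList (PySem.Chars.upperChar c :: rest.map PySem.Chars.lowerChar)

-- ===== PORT A =====
-- the for-loop over name_segs with early break once len(ret) > 30
def suggestLoopA : List String → String → String
  | [], ret => ret
  | w :: ws, ret =>
    let ret' := ret ++ pyCapitalize w
    if PySem.Str.len ret' > 30 then ret' else suggestLoopA ws ret'

def suggest_default_link_name (name : String) (image : Bool) : String :=
  let name_segs := PySem.Str.split₀ name
  if name_segs.length > 1 then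
    (if image then "image" else "link") ++ suggestLoopA name_segs ""
  else
    name

-- ===== PORT B =====
-- the loop building the cumulative-length table `cum`
def cumLens : List String → Int → List Int
  | [], _ => []
  | c :: cs, total => (total + PySem.Str.len c) :: cumLens cs (total + PySem.Str.len c)

def suggest_default_link_name_alt (name : String) (image : Bool) : String :=
  let words := PySem.Str.split₀ name
  if words.length ≤ 1 then
    name
  else
    let caps := words.map pyCapitalize
    let cum := cumLens caps 0
    let keep := match cum.findIdx? (fun t => t > 30) with
      | some i => i + 1
      | none => caps.length
    (if image then "image" else "link") ++ PySem.Str.join "" (caps.take keep)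

-- ===== PRECONDITION & SPEC =====
def Spec_suggest_default_link_name (name : String) (image : Bool) (out : String) : Prop := out = suggest_default_link_name_alt name image
instance (name : String) (image : Bool) (out : String) : Decidable (Spec_suggest_default_link_name name image out) := by unfold Spec_suggest_default_link_name; infer_instance

-- ===== CLAIM (what is proved, stated in full; the proofs are below) =====
def Claim_equal_suggest_default_link_name : Prop := ∀ (name : String) (image : Bool), Dom_suggest_default_link_name name image → Spec_suggest_default_link_name name image (suggest_default_link_name name image)

-- ===== LEMMAS AND PROOFS =====

-- the number of words A's loop consumes, as a function of the running length
def keepFrom : Int → List String → Nat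
  | _, [] => 0
  | t, c :: cs => if t + PySem.Str.len c > 30 then 1 else 1 + keepFrom (t + PySem.Str.len c) cs

theorem str_join_empty_cons (x : String) (l : List String) :
    PySem.Str.join "" (x :: l) = x ++ PySem.Str.join "" l := by
  cases l <;> simp [PySem.Str.join, PySem.Chars.join_singleton, PySem.Chars.join_cons_cons,
    PySem.Chars.join_nil]

theorem str_len_append (a b : String) :
    PySem.Str.len (a ++ b) = PySem.Str.len a + PySem.Str.len b := by
  simp [PySem.Str.len_eq]

theorem cumLens_findIdx_eq_keepFrom (cs : List String) : ∀ t : Int,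
    (match (cumLens cs t).findIdx? (fun x => x > 30) with
      | some i => i + 1
      | none => cs.length) = keepFrom t cs := by
  induction cs with
  | nil => intro t; simp [cumLens, keepFrom]
  | cons c cs ih =>
    intro t
    simp only [cumLens, keepFrom, List.findIdx?_cons]
    by_cases h : t + PySem.Str.len c > 30
    · rw [if_pos (by simpa using h), if_pos h]
    · rw [if_neg (by simpa using h), if_neg h]
      rw [← ih (t + PySem.Str.len c)]
      cases (cumLens cs (t + PySem.Str.len c)).findIdx? (fun x => x > 30) with
      | none => show (c :: cs).length = 1 + cs.length; simp [Nat.add_comm]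
      | some i => show i + 1 + 1 = 1 + (i + 1); omega

theorem loopA_eq_join (ws : List String) : ∀ ret : String,
    suggestLoopA ws ret =
      ret ++ PySem.Str.join "" ((ws.map pyCapitalize).take
        (keepFrom (PySem.Str.len ret) (ws.map pyCapitalize))) := by
  induction ws with
  | nil =>
    intro ret
    simp [suggestLoopA, keepFrom, PySem.Str.join, PySem.Chars.join, List.intercalate]
  | cons w ws ih =>
    intro ret
    simp only [suggestLoopA, List.map_cons, keepFrom, str_len_append]
    by_cases h : PySem.Str.len ret + PySem.Str.len (pyCapitalize w) > 30
    · rw [if_pos h, if_pos h]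
      simp [PySem.Str.join, PySem.Chars.join, List.intercalate]
    · rw [if_neg h, if_neg h, ih (ret ++ pyCapitalize w), str_len_append]
      rw [Nat.add_comm 1 _, List.take_succ_cons, str_join_empty_cons, ← String.append_assoc]

-- ===== VERDICT (by name: the statement is the Claim_ definition above) =====
theorem suggest_default_link_name_spec : Claim_equal_suggest_default_link_name := by
  unfold Claim_equal_suggest_default_link_name Spec_suggest_default_link_name
  intro name image _
  unfold suggest_default_link_name suggest_default_link_name_alt
  by_cases h : (PySem.Str.split₀ name).length ≤ 1
  · rw [if_neg (by omega), if_pos h]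
  · rw [if_pos (by omega), if_neg h]
    rw [loopA_eq_join, ← cumLens_findIdx_eq_keepFrom]
    have hlen : PySem.Str.len "" = 0 := by decide
    rw [hlen]
    simp
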